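-- pv_equiv track=rewrite | github.com/mridulpandeyml/tnp_assignment | practice_questions/non_adj_dishes.py | max_non_adjacent_dishes
-- ===== SOURCE A (Python) =====
-- def max_non_adjacent_dishes(dishes):
--     n=len(dishes)
--     if n==0:
--         return 0
--     if n==1:
--         return 1
--     count={}
--     last={}
--     for i in range(n):
--         if dishes[i] not in count:
--             count[dishes[i]]=1
--             last[dishes[i]]=i
--         else:
--             if last[dishes[i]]!=i-1:
--                 count[dishes[i]]+=1
--                 last[dishes[i]]=i
--     most_dish=-1
--     result=-1
--     for i in dishes:
--         if count[i]>most_dish: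
--             most_dish=count[i]
--             result=i
--     return result
-- ===== SOURCE B (Python) =====
-- def max_non_adjacent_dishes(dishes):
--     # run-length encode: each maximal run of L equal adjacent dishes
--     # contributes ceil(L/2) = (L+1)//2 non-adjacent picks for that dish
--     if not dishes:
--         return 0
--     counts = {}
--     run_val = dishes[0]
--     run_len = 0
--     for d in dishes:
--         if d == run_val:
--             run_len += 1
--         else:
--             counts[run_val] = counts.get(run_val, 0) + (run_len + 1) // 2
--             run_val, run_len = d, 1
--     counts[run_val] = counts.get(run_val, 0) + (run_len + 1) // 2
--     best = -1
--     result = -1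
--     for d in dishes:
--         if counts[d] > best:
--             best, result = counts[d], d
--     return result
-- ===== Notes on version B (the rewrite author's own statement) =====
-- stated objective: alternative
-- what changed: B replaces A's per-index dicts of counts and last-kept indices with run-length encoding: each maximal run of L equal adjacent dishes contributes (L+1)//2 to its dish's count, flushed once per run; the first-max selection scan over dishes is kept.
-- intended difference: On one-element lists whose single dish is not the number 1, A's n==1 guard returns the literal 1 instead of the dish, while B returns the dish itself, which is the intended most-frequent-dish answer. — e.g. on max_non_adjacent_dishes([5]): A returns 1, B returns 5
import Mathlib
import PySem

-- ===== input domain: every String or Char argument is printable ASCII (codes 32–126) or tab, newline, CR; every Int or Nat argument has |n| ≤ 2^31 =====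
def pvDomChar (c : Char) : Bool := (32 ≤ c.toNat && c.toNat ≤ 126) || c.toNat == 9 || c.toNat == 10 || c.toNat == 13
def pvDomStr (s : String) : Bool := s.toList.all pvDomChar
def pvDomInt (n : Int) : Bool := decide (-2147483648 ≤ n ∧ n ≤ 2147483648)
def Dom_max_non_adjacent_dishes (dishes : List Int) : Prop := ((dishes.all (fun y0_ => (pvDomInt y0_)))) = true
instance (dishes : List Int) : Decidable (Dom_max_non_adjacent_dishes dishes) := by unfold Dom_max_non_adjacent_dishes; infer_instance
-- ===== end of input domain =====

-- B counts each dish by run-length encoding (each maximal run of L adjacent equal dishes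
-- contributes (L+1)//2) instead of A's per-index last-kept bookkeeping; objective: alternative.

-- ===== PORT A =====
-- loop body of A's `for i in range(n)` (state: the dicts count, last; p = (i, dishes[i]))
def aStep (s : PySem.Dict Int Int × PySem.Dict Int Int) (p : Int × Int) :
    PySem.Dict Int Int × PySem.Dict Int Int :=
  if s.1.contains p.2 = false then
    (s.1.insert p.2 1, s.2.insert p.2 p.1)
  else if s.2.getD p.2 0 ≠ p.1 - 1 then   -- last[dishes[i]] lookup; key always present (KeyError unreachable)
    (s.1.insert p.2 (s.1.getD p.2 0 + 1), s.2.insert p.2 p.1)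
  else s

-- A's selection loop body: first dish whose count strictly exceeds the running max
def aSel (c : PySem.Dict Int Int) (p : Int × Int) (d : Int) : Int × Int :=
  if c.getD d 0 > p.1 then (c.getD d 0, d) else p   -- count[i] lookup; key always present

def max_non_adjacent_dishes (dishes : List Int) : Int :=
  let n : Int := PySem.List.len dishes
  if n = 0 then 0
  else if n = 1 then 1
  else
    let st := (PySem.List.pyRange 0 n 1).foldl
      (fun s i => aStep s (i, PySem.List.pyGetD dishes i 0))   -- dishes[i], i in range
      (PySem.Dict.empty, PySem.Dict.empty)
    (dishes.foldl (aSel st.1) (-1, -1)).2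

-- ===== PORT B =====
-- loop body of B: state (counts, run_val, run_len)
def bStep (s : PySem.Dict Int Int × Int × Int) (d : Int) : PySem.Dict Int Int × Int × Int :=
  if d = s.2.1 then (s.1, s.2.1, s.2.2 + 1)
  else (s.1.insert s.2.1 (s.1.getD s.2.1 0 + PySem.Int.floordiv (s.2.2 + 1) 2), d, 1)

-- B's final flush of the pending run
def bFlush (s : PySem.Dict Int Int × Int × Int) : PySem.Dict Int Int :=
  s.1.insert s.2.1 (s.1.getD s.2.1 0 + PySem.Int.floordiv (s.2.2 + 1) 2)

-- B's selection loop body (same selection as A, on B's counts)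
def bSel (c : PySem.Dict Int Int) (p : Int × Int) (d : Int) : Int × Int :=
  if c.getD d 0 > p.1 then (c.getD d 0, d) else p

def max_non_adjacent_dishes_alt (dishes : List Int) : Int :=
  if dishes = [] then 0
  else
    let st := dishes.foldl bStep (PySem.Dict.empty, PySem.List.pyGetD dishes 0 0, 0)
    let counts := bFlush st
    (dishes.foldl (bSel counts) (-1, -1)).2

-- ===== PRECONDITION & SPEC =====
-- On one-element lists whose single dish is not the number 1, A's n==1 guard returns the literal 1
-- instead of the dish, whereas B returns the dish itself, the intended "most frequent dish" answer.
def D_max_non_adjacent_dishes (dishes : List Int) : Prop := dishes.length = 1 ∧ dishes ≠ [1]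
instance (dishes : List Int) : Decidable (D_max_non_adjacent_dishes dishes) := by
  unfold D_max_non_adjacent_dishes; infer_instance
def Spec_max_non_adjacent_dishes (dishes : List Int) (out : Int) : Prop :=
  ¬ D_max_non_adjacent_dishes dishes → out = max_non_adjacent_dishes_alt dishes
instance (dishes : List Int) (out : Int) : Decidable (Spec_max_non_adjacent_dishes dishes out) := by
  unfold Spec_max_non_adjacent_dishes; infer_instance
def pvDiffWitness_max_non_adjacent_dishes : List Int := [5]
def pvDiffWitnessOut_max_non_adjacent_dishes : Int × Int := (1, 5)

-- ===== CLAIM (what is proved, stated in full; the proofs are below) =====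
def Claim_unchanged_max_non_adjacent_dishes : Prop := ∀ (dishes : List Int), Dom_max_non_adjacent_dishes dishes → Spec_max_non_adjacent_dishes dishes (max_non_adjacent_dishes dishes)
def Claim_changed_max_non_adjacent_dishes : Prop := Dom_max_non_adjacent_dishes (pvDiffWitness_max_non_adjacent_dishes) ∧ D_max_non_adjacent_dishes (pvDiffWitness_max_non_adjacent_dishes) ∧ max_non_adjacent_dishes (pvDiffWitness_max_non_adjacent_dishes) = pvDiffWitnessOut_max_non_adjacent_dishes.1 ∧ max_non_adjacent_dishes_alt (pvDiffWitness_max_non_adjacent_dishes) = pvDiffWitnessOut_max_non_adjacent_dishes.2 ∧ pvDiffWitnessOut_max_non_adjacent_dishes.1 ≠ pvDiffWitnessOut_max_non_adjacent_dishes.2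
def Claim_exact_max_non_adjacent_dishes : Prop := ∀ (dishes : List Int), Dom_max_non_adjacent_dishes dishes → D_max_non_adjacent_dishes dishes → max_non_adjacent_dishes dishes ≠ max_non_adjacent_dishes_alt dishes

-- ===== LEMMAS AND PROOFS =====

-- Simulation invariant between A's loop state (count, last) just before index i and
-- B's loop state (counts, run_val = rv, run_len = rl) at the same point.
def SimInv (count last counts : PySem.Dict Int Int) (rv rl i : Int) : Prop :=
  1 ≤ rl ∧
  count.get? rv = some (counts.getD rv 0 + (rl + 1) / 2) ∧
  last.get? rv = some (i - rl + 2 * ((rl - 1) / 2)) ∧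
  (∀ d, d ≠ rv → count.get? d = counts.get? d) ∧
  (∀ d, d ≠ rv → count.contains d = true → ∃ j, last.get? d = some j ∧ j ≤ i - 2)

lemma floordiv_two (a : Int) : PySem.Int.floordiv a 2 = a / 2 :=
  PySem.Int.floordiv_eq_ediv_of_pos (by omega)

lemma inv_main : ∀ (rest : List Int) (count last counts : PySem.Dict Int Int) (rv rl i : Int),
    SimInv count last counts rv rl i →
    ∀ d, ((PySem.List.enumerate rest i).foldl aStep (count, last)).1.get? d
        = (bFlush (rest.foldl bStep (counts, rv, rl))).get? d := by
  intro rest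
  induction rest with
  | nil =>
    intro count last counts rv rl i hInv d
    obtain ⟨hrl, hcrv, hlrv, hco, hlast⟩ := hInv
    simp only [PySem.List.enumerate_nil, List.foldl_nil, bFlush, floordiv_two]
    by_cases hd : d = rv
    · subst hd; rw [PySem.Dict.get?_insert_self, hcrv]
    · rw [PySem.Dict.get?_insert_of_ne _ _ hd]
      exact hco d hd
  | cons x rest ih =>
    intro count last counts rv rl i hInv d
    obtain ⟨hrl, hcrv, hlrv, hco, hlast⟩ := hInv
    rw [PySem.List.enumerate_cons]
    simp only [List.foldl_cons]
    by_cases hx : x = rv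
    · -- same dish as the current run
      subst hx
      have hcont : count.contains x = true := by
        rcases h : count.contains x
        · rw [← PySem.Dict.get?_eq_none_iff_contains] at h; rw [h] at hcrv; exact absurd hcrv (by simp)
        · rfl
      have hgl : last.getD x 0 = i - rl + 2 * ((rl - 1) / 2) :=
        PySem.Dict.getD_of_get?_eq_some _ _ hlrv
      show ((PySem.List.enumerate rest (i+1)).foldl aStep (aStep (count, last) (i, x))).1.get? d
          = (bFlush ((rest.foldl bStep (bStep (counts, x, rl) x)))).get? d
      have hbs : bStep (counts, x, rl) x = (counts, x, rl + 1) := by simp [bStep]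
      rw [hbs]
      by_cases hpar : i - rl + 2 * ((rl - 1) / 2) = i - 1
      · -- run length odd so far: A skips this occurrence
        have has : aStep (count, last) (i, x) = (count, last) := by
          simp [aStep, hcont, hgl, hpar]
        rw [has]
        refine ih count last counts x (rl + 1) (i + 1) ⟨by omega, ?_, ?_, hco, ?_⟩ d
        · rw [hcrv]; congr 1; omega
        · rw [hlrv]; congr 1; omega
        · intro e he hce
          obtain ⟨j, hj, hjle⟩ := hlast e he hce
          exact ⟨j, hj, by omega⟩
      · -- run length even so far: A keeps this occurrence
        have has : aStep (count, last) (i, x)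
            = (count.insert x (count.getD x 0 + 1), last.insert x i) := by
          simp [aStep, hcont, hgl, hpar]
        rw [has]
        have hgc : count.getD x 0 = counts.getD x 0 + (rl + 1) / 2 :=
          PySem.Dict.getD_of_get?_eq_some _ _ hcrv
        refine ih _ _ counts x (rl + 1) (i + 1) ⟨by omega, ?_, ?_, ?_, ?_⟩ d
        · rw [PySem.Dict.get?_insert_self, hgc]; congr 1; omega
        · rw [PySem.Dict.get?_insert_self]; congr 1; omega
        · intro e he
          rw [PySem.Dict.get?_insert_of_ne _ _ he]
          exact hco e he
        · intro e he hce
          rw [PySem.Dict.contains_insert] at hce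
          have hce' : count.contains e = true := by
            cases hbe : (e == x) with
            | true => exact absurd (by simpa using hbe) he
            | false => rw [hbe] at hce; simpa using hce
          obtain ⟨j, hj, hjle⟩ := hlast e he hce'
          exact ⟨j, by rw [PySem.Dict.get?_insert_of_ne _ _ he]; exact hj, by omega⟩
    · -- run breaks: B flushes the run, A treats x by its last-kept index
      have hbs : bStep (counts, rv, rl)  x
          = (counts.insert rv (counts.getD rv 0 + PySem.Int.floordiv (rl + 1) 2), x, 1) := by
        simp [bStep, hx]
      show ((PySem.List.enumerate rest (i+1)).foldl aStep (aStep (count, last) (i, x))).1.get? d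
          = (bFlush ((rest.foldl bStep (bStep (counts, rv, rl) x)))).get? d
      rw [hbs]
      set counts' := counts.insert rv (counts.getD rv 0 + PySem.Int.floordiv (rl + 1) 2) with hc'
      have hget' : ∀ e, e ≠ rv → counts'.get? e = counts.get? e := fun e he =>
        PySem.Dict.get?_insert_of_ne _ _ he
      have hgrv : counts'.get? rv = some (counts.getD rv 0 + (rl + 1) / 2) := by
        rw [hc', PySem.Dict.get?_insert_self, floordiv_two]
      -- common facts for the new invariant (new run: value x, length 1, next index i+1)
      have hclause5 : ∀ (last' : PySem.Dict Int Int), last' = last.insert x i →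
          ∀ e, e ≠ x → ∀ (cc : Bool), (cc = true → count.contains e = true ∨ e = rv) →
          cc = true → ∃ j, last'.get? e = some j ∧ j ≤ (i + 1) - 2 := by
        intro last' hl' e he cc hcc hcct
        rw [hl', PySem.Dict.get?_insert_of_ne _ _ he]
        rcases hcc hcct with hce | hrv
        · by_cases herv : e = rv
          · subst herv; exact ⟨_, hlrv, by omega⟩
          · obtain ⟨j, hj, hjle⟩ := hlast e herv hce
            exact ⟨j, hj, by omega⟩
        · subst hrv; exact ⟨_, hlrv, by omega⟩
      by_cases hseen : count.contains x = true
      · -- x already seen; its last kept index is ≤ i-2, so A counts it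
        obtain ⟨j, hj, hjle⟩ := hlast x hx hseen
        have hgl : last.getD x 0 = j := PySem.Dict.getD_of_get?_eq_some _ _ hj
        have has : aStep (count, last) (i, x)
            = (count.insert x (count.getD x 0 + 1), last.insert x i) := by
          have : ¬ (j = i - 1) := by omega
          simp [aStep, hseen, hgl, this]
        rw [has]
        have hsome : ∃ v, count.get? x = some v := by
          rcases h : count.get? x with _ | v
          · rw [PySem.Dict.get?_eq_none_iff_contains] at h; rw [h] at hseen; cases hseen
          · exact ⟨v, rfl⟩
        obtain ⟨v, hv⟩ := hsome
        have hgc : count.getD x 0 = v := PySem.Dict.getD_of_get?_eq_some _ _ hv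
        have hcv : counts'.getD x 0 = v := by
          rw [PySem.Dict.getD_eq_get?_getD, hget' x hx, ← hco x hx, hv]; rfl
        refine ih _ _ counts' x 1 (i + 1) ⟨by omega, ?_, ?_, ?_, ?_⟩ d
        · rw [PySem.Dict.get?_insert_self, hgc, hcv]; norm_num
        · rw [PySem.Dict.get?_insert_self]; congr 1; norm_num
        · intro e he
          rw [PySem.Dict.get?_insert_of_ne _ _ he]
          by_cases herv : e = rv
          · subst herv; rw [hgrv, hcrv]
          · rw [hget' e herv]; exact hco e herv
        · intro e he hce
          refine hclause5 _ rfl e he _ ?_ hce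
          intro _
          rw [PySem.Dict.contains_insert] at hce
          cases hbe : (e == x) with
          | true => exact absurd (by simpa using hbe) he
          | false => rw [hbe] at hce; left; simpa using hce
      · -- x unseen: A initialises count[x]=1, last[x]=i
        have has : aStep (count, last) (i, x) = (count.insert x 1, last.insert x i) := by
          simp [aStep, hseen]
        rw [has]
        have hnone : count.get? x = none := by
          rw [PySem.Dict.get?_eq_none_iff_contains]; simpa using hseen
        have hcv : counts'.getD x 0 = 0 := by
          rw [PySem.Dict.getD_eq_get?_getD, hget' x hx, ← hco x hx, hnone]; rfl
        refine ih _ _ counts' x 1 (i + 1) ⟨by omega, ?_, ?_, ?_, ?_⟩ d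
        · rw [PySem.Dict.get?_insert_self, hcv]; norm_num
        · rw [PySem.Dict.get?_insert_self]; congr 1; norm_num
        · intro e he
          rw [PySem.Dict.get?_insert_of_ne _ _ he]
          by_cases herv : e = rv
          · subst herv; rw [hgrv, hcrv]
          · rw [hget' e herv]; exact hco e herv
        · intro e he hce
          refine hclause5 _ rfl e he _ ?_ hce
          intro _
          rw [PySem.Dict.contains_insert] at hce
          cases hbe : (e == x) with
          | true => exact absurd (by simpa using hbe) he
          | false => rw [hbe] at hce; left; simpa using hce

lemma alt_singleton (d : Int) : max_non_adjacent_dishes_alt [d] = d := by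
  simp [max_non_adjacent_dishes_alt, bStep, bFlush, bSel,
    PySem.List.pyGetD_zero_cons, PySem.Dict.getD_insert_self, PySem.Dict.getD_empty]

-- ===== VERDICT (by name: the statement is the Claim_ definition above) =====
lemma a_cons2 (a b : Int) (t : List Int) :
    max_non_adjacent_dishes (a :: b :: t)
      = ((a :: b :: t).foldl
          (aSel ((PySem.List.enumerate (b :: t) 1).foldl aStep
                  (PySem.Dict.empty.insert a 1, PySem.Dict.empty.insert a 0)).1) (-1, -1)).2 := by
  have h0 : ¬ (PySem.List.len (a :: b :: t) = 0) := by
    simp [PySem.List.len_eq]; omega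
  have h1 : ¬ (PySem.List.len (a :: b :: t) = 1) := by
    simp [PySem.List.len_eq]; omega
  simp only [max_non_adjacent_dishes, if_neg h0, if_neg h1]
  rw [← List.foldl_map (f := fun j => (j, PySem.List.pyGetD (a :: b :: t) j 0)) (g := aStep),
    ← PySem.List.enumerate_eq_map_pyRange (a :: b :: t) 0]
  have hfirst : aStep (PySem.Dict.empty, PySem.Dict.empty) (0, a)
      = (PySem.Dict.empty.insert a 1, PySem.Dict.empty.insert a 0) := by
    simp [aStep, PySem.Dict.contains_empty]
  have hdict : List.foldl aStep (PySem.Dict.empty, PySem.Dict.empty)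
        (PySem.List.enumerate (a :: b :: t) 0)
      = List.foldl aStep (PySem.Dict.empty.insert a 1, PySem.Dict.empty.insert a 0)
        (PySem.List.enumerate (b :: t) 1) := by
    rw [PySem.List.enumerate_cons, List.foldl_cons, hfirst]
    norm_num
  rw [hdict]

lemma b_cons (a : Int) (t : List Int) :
    max_non_adjacent_dishes_alt (a :: t)
      = ((a :: t).foldl (bSel (bFlush (t.foldl bStep (PySem.Dict.empty, a, 1)))) (-1, -1)).2 := by
  have hne : ¬ (a :: t = ([] : List Int)) := by simp
  simp only [max_non_adjacent_dishes_alt, if_neg hne, PySem.List.pyGetD_zero_cons,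
    List.foldl_cons]
  have hfirst : bStep (PySem.Dict.empty, a, 0) a = (PySem.Dict.empty, a, 1) := by
    simp [bStep]
  rw [hfirst]

theorem max_non_adjacent_dishes_spec : Claim_unchanged_max_non_adjacent_dishes := by
  intro dishes _
  unfold Spec_max_non_adjacent_dishes
  intro hnD
  match dishes with
  | [] => decide
  | [a] =>
    have ha : a = 1 := by
      by_contra h
      exact hnD ⟨rfl, by simp [h]⟩
    subst ha; decide
  | a :: b :: t =>
    rw [a_cons2, b_cons]
    have hInv : SimInv (PySem.Dict.empty.insert a 1) (PySem.Dict.empty.insert a 0)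
        PySem.Dict.empty a 1 1 := by
      refine ⟨le_refl 1, ?_, ?_, ?_, ?_⟩
      · rw [PySem.Dict.get?_insert_self]; norm_num
      · rw [PySem.Dict.get?_insert_self]; norm_num
      · intro e he
        rw [PySem.Dict.get?_insert_of_ne _ _ he]
      · intro e he hce
        rw [PySem.Dict.contains_insert] at hce
        exfalso
        cases hbe : (e == a) with
        | true => exact he (by simpa using hbe)
        | false => rw [hbe] at hce; simp [PySem.Dict.contains_empty] at hce
    have hkey := inv_main (b :: t) _ _ PySem.Dict.empty a 1 1 hInv
    have hgetD : ∀ e, (((PySem.List.enumerate (b :: t) 1).foldl aStep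
          (PySem.Dict.empty.insert a 1, PySem.Dict.empty.insert a 0)).1).getD e 0
        = (bFlush ((b :: t).foldl bStep (PySem.Dict.empty, a, 1))).getD e 0 := by
      intro e
      rw [PySem.Dict.getD_eq_get?_getD, PySem.Dict.getD_eq_get?_getD, hkey e]
    congr 1
    apply PySem.List.foldl_congr_mem
    intro acc x _
    simp only [aSel, bSel, hgetD x]

theorem max_non_adjacent_dishes_changed : Claim_changed_max_non_adjacent_dishes := by
  unfold Claim_changed_max_non_adjacent_dishes; decide

theorem max_non_adjacent_dishes_tight : Claim_exact_max_non_adjacent_dishes := by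
  intro dishes _ hD
  obtain ⟨hlen, hne⟩ := hD
  match dishes, hlen with
  | [d], _ =>
    rw [alt_singleton]
    have hd : d ≠ 1 := by intro h; exact hne (by simp [h])
    simp [max_non_adjacent_dishes, PySem.List.len]
    omega
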